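-- pv_equiv track=rewrite | github.com/suttala/Python | dicepoker.py | acceptable
-- ===== SOURCE A (Python) =====
-- def acceptable(numberlist):
--     i = 0
--     a = 0
--     while i != len(numberlist):
--         if 0 <= numberlist[i] <= 4:
--             if i == 0:
--                 a += 1
--             else:
--                 erotus = numberlist[i] - numberlist[i-1]
--                 if erotus != 0:
--                     a += 1
--         i += 1
--     if a == len(numberlist):
--         return True
--     else:
--         return False
-- ===== SOURCE B (Python) =====
-- def acceptable(numberlist):
--     in_range = all(0 <= x <= 4 for x in numberlist)
--     no_repeat = all(a != b for a, b in zip(numberlist, numberlist[1:]))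
--     return in_range and no_repeat
-- ===== Notes on version B (the rewrite author's own statement) =====
-- stated objective: simpler
-- what changed: Replaced the fused index/counter loop (count elements that pass, compare count to len) with two direct boolean scans: all elements in range 0..4, and no adjacent pair equal via zip with the tail.
import Mathlib
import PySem

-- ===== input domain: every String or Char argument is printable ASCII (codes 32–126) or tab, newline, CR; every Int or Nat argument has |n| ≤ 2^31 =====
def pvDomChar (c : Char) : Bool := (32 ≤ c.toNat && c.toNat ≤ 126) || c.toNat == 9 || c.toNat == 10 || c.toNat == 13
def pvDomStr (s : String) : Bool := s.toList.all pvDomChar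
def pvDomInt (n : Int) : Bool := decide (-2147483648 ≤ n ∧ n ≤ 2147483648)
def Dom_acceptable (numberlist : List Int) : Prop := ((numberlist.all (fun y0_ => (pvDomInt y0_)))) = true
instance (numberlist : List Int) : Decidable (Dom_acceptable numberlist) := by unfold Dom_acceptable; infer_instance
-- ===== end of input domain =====

-- B replaces A's fused count-and-compare index loop by two independent boolean scans (range check, adjacent-pair check); objective: simpler.

-- ===== PORT A =====
-- the while-loop over i with counter a, as a fold over the index range
def acceptableLoop (numberlist : List Int) : Int :=
  (List.range numberlist.length).foldl (fun a i =>
    if 0 ≤ numberlist.getD i 0 ∧ numberlist.getD i 0 ≤ 4 then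
      if i = 0 then a + 1
      else
        let erotus := numberlist.getD i 0 - numberlist.getD (i - 1) 0
        if erotus ≠ 0 then a + 1 else a
    else a) 0

def acceptable (numberlist : List Int) : Bool :=
  if acceptableLoop numberlist = (numberlist.length : Int) then true else false

-- ===== PORT B =====
def acceptable_alt (numberlist : List Int) : Bool :=
  let inRange := numberlist.all (fun x => decide (0 ≤ x ∧ x ≤ 4))
  let noRepeat := (numberlist.zip (numberlist.drop 1)).all (fun p => decide (p.1 ≠ p.2))
  inRange && noRepeat

-- ===== PRECONDITION & SPEC =====
def Spec_acceptable (numberlist : List Int) (out : Bool) : Prop := out = acceptable_alt numberlist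
instance (numberlist : List Int) (out : Bool) : Decidable (Spec_acceptable numberlist out) := by unfold Spec_acceptable; infer_instance

-- ===== CLAIM (what is proved, stated in full; the proofs are below) =====
def Claim_equal_acceptable : Prop := ∀ (numberlist : List Int), Dom_acceptable numberlist → Spec_acceptable numberlist (acceptable numberlist)

-- ===== LEMMAS AND PROOFS =====

-- the per-index predicate A's loop counts
def pvP (l : List Int) (i : Nat) : Bool :=
  if 0 ≤ l.getD i 0 ∧ l.getD i 0 ≤ 4 then
    if i = 0 then true
    else decide (l.getD i 0 - l.getD (i - 1) 0 ≠ 0)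
  else false

theorem pvLoop_eq_countP (l : List Int) (n : Nat) :
    (List.range n).foldl (fun a i =>
      if 0 ≤ l.getD i 0 ∧ l.getD i 0 ≤ 4 then
        if i = 0 then a + 1
        else
          let erotus := l.getD i 0 - l.getD (i - 1) 0
          if erotus ≠ 0 then a + 1 else a
      else a) 0 = ((List.range n).countP (pvP l) : Int) := by
  induction n with
  | zero => simp
  | succ n ih =>
    rw [List.range_succ, List.foldl_append, List.countP_append, ih]
    simp only [List.foldl_cons, List.foldl_nil, List.countP_cons, List.countP_nil, pvP]
    split_ifs <;> simp_all

-- `l.getD i 0` is `l[i]` for an in-range index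
theorem pvGd (l : List Int) (i : Nat) (h : i < l.length) : l.getD i 0 = l[i] := by
  rw [List.getD_eq_getElem?_getD, List.getElem?_eq_getElem h, Option.getD_some]

theorem pvA_eq_allP (l : List Int) :
    acceptable l = (List.range l.length).all (pvP l) := by
  rw [acceptable, acceptableLoop, pvLoop_eq_countP]
  by_cases hall : ∀ i ∈ List.range l.length, pvP l i = true
  · have hc : (List.range l.length).countP (pvP l) = l.length := by
      rw [List.countP_eq_length.mpr hall, List.length_range]
    rw [if_pos (by exact_mod_cast hc)]
    exact (List.all_eq_true.mpr hall).symm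
  · have hne : (List.range l.length).countP (pvP l) ≠ l.length := fun h' =>
      hall (List.countP_eq_length.mp (by rw [h', List.length_range]))
    rw [if_neg (by intro h'; exact hne (by exact_mod_cast h'))]
    exact (Bool.eq_false_iff.mpr (fun h => hall (List.all_eq_true.mp h))).symm

theorem pvB_iff (l : List Int) :
    acceptable_alt l = true ↔
      ((∀ x ∈ l, 0 ≤ x ∧ x ≤ 4) ∧
       ∀ i (h : i + 1 < l.length), l[i]! ≠ l[i+1]!) := by
  rw [acceptable_alt]
  simp only [Bool.and_eq_true, List.all_eq_true, decide_eq_true_eq]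
  constructor
  · rintro ⟨h1, h2⟩
    refine ⟨h1, ?_⟩
    intro i hi
    have hiz : i < (l.zip (l.drop 1)).length := by
      simp [List.length_zip, List.length_drop]; omega
    have := h2 _ (List.getElem_mem hiz)
    have hget : (l.zip (l.drop 1))[i] = (l[i], l[i+1]) := by
      have hi1 : i < l.length := by omega
      have hi2 : i < (l.drop 1).length := by simp [List.length_drop]; omega
      simp [List.getElem_zip, List.getElem_drop, Nat.add_comm 1 i]
    rw [hget] at this
    simpa [getElem!_pos, hi, Nat.lt_of_succ_lt hi] using this
  · rintro ⟨h1, h2⟩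
    refine ⟨h1, ?_⟩
    intro p hp
    obtain ⟨i, hi, hget⟩ := List.getElem_of_mem hp
    have hlen : i + 1 < l.length := by
      simp [List.length_zip, List.length_drop] at hi; omega
    have hi1 : i < l.length := by omega
    have hi2 : i < (l.drop 1).length := by simp [List.length_drop]; omega
    have : p = (l[i], l[i+1]) := by
      rw [← hget]; simp [List.getElem_zip, List.getElem_drop, Nat.add_comm 1 i]
    rw [this]
    have := h2 i hlen
    simpa [getElem!_pos, hlen, hi1] using this

theorem pvAllP_iff (l : List Int) :
    (List.range l.length).all (pvP l) = true ↔
      ((∀ x ∈ l, 0 ≤ x ∧ x ≤ 4) ∧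
       ∀ i (h : i + 1 < l.length), l[i]! ≠ l[i+1]!) := by
  rw [List.all_eq_true]
  constructor
  · intro h
    refine ⟨?_, ?_⟩
    · intro x hx
      obtain ⟨i, hi, hget⟩ := List.getElem_of_mem hx
      have hp := h i (by simpa using hi)
      rw [pvP] at hp
      split_ifs at hp with hr
      · rw [pvGd l i hi, hget] at hr; exact hr
      · rw [pvGd l i hi, hget] at hr; exact hr
    · intro i hi
      have hi1 : i < l.length := Nat.lt_of_succ_lt hi
      have hp := h (i+1) (by simpa using hi)
      rw [pvP, if_neg (by omega : ¬ (i + 1 = 0))] at hp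
      split_ifs at hp with hr
      · simp only [Nat.add_sub_cancel, decide_eq_true_eq] at hp
        rw [pvGd l (i+1) hi, pvGd l i hi1] at hp
        rw [getElem!_pos l i hi1, getElem!_pos l (i+1) hi]
        omega
  · rintro ⟨h1, h2⟩ i hi
    rw [List.mem_range] at hi
    rw [pvP]
    have hr : 0 ≤ l.getD i 0 ∧ l.getD i 0 ≤ 4 := by
      rw [pvGd l i hi]; exact h1 _ (List.getElem_mem hi)
    rw [if_pos hr]
    rcases Nat.eq_zero_or_pos i with h0 | h0
    · simp [h0]
    · rw [if_neg (by omega)]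
      have hi1 : i - 1 < l.length := by omega
      have hd := h2 (i-1) (by omega)
      rw [(by omega : i - 1 + 1 = i)] at hd
      rw [getElem!_pos l (i-1) hi1, getElem!_pos l i hi] at hd
      rw [pvGd l i hi, pvGd l (i-1) hi1]
      simp only [decide_eq_true_eq]
      omega

-- ===== VERDICT (by name: the statement is the Claim_ definition above) =====
theorem acceptable_spec : Claim_equal_acceptable := by
  intro l _
  show acceptable l = acceptable_alt l
  rw [pvA_eq_allP]
  have hiff := (pvAllP_iff l).trans (pvB_iff l).symm
  cases h1 : (List.range l.length).all (pvP l) <;> cases h2 : acceptable_alt l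
  · rfl
  · exact absurd (hiff.mpr h2) (by simp [h1])
  · exact absurd (hiff.mp h1) (by simp [h2])
  · rfl
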